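-- pv_equiv track=rewrite | github.com/pchamely1/GoT_splice | NMD_caller_final.py | correctStartCodonFinder
-- ===== SOURCE A (Python) =====
-- def correctStartCodonFinder(nucleotideSeq, lastExonLen, potStartCodonStarts, distToJunc, strand, codonsPos, codonsNeg):
--     '''finds the correct start codon for a nucleotide sequence (if a start codon causes a PTC between the start codon and the AS junction, it is not correct)'''
--     if strand == '-':
--         nucleotideSeq = nucleotideSeq[::-1]
--         codons = [x[::-1] for x in codonsNeg]
--     else:
--         codons = codonsPos
--     for i in potStartCodonStarts:
--         potSeq = nucleotideSeq[i:distToJunc]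
--         codonList = [potSeq[0+i:3+i] for i in range(0, len(potSeq), 3)]
--         if len(set(codonList).intersection(codons)) > 0:
--             pass
--         else:
--             finalSeq = nucleotideSeq[i:len(nucleotideSeq)-lastExonLen-50]
--             if strand == '-':
--                 finalSeq = finalSeq[::-1]
--             return(finalSeq)
-- ===== SOURCE B (Python) =====
-- def correctStartCodonFinder(nucleotideSeq, lastExonLen, potStartCodonStarts, distToJunc, strand, codonsPos, codonsNeg):
--     '''Single O(n) right-to-left precomputation of "is there an in-frame stop codon at or
--     after position j before the junction", then each candidate start is an O(1) lookup.'''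
--     neg = strand == '-'
--     seq = nucleotideSeq[::-1] if neg else nucleotideSeq
--     stops = {c[::-1] for c in codonsNeg} if neg else set(codonsPos)
--     n = len(seq)
--
--     def clamp(k):
--         if k < 0:
--             k += n
--         return 0 if k < 0 else (n if k > n else k)
--
--     hi = clamp(distToJunc)
--     # rev[-1 - j] (for j < hi) == True  iff some codon window j, j+3, j+6, ... (cut at hi) is a stop
--     rev = [False, False, False]
--     for j in reversed(range(hi)):
--         rev.append(seq[j:min(j + 3, hi)] in stops or rev[-3])
--     suffix = rev[::-1]
--     end = clamp(n - lastExonLen - 50)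
--     for i in potStartCodonStarts:
--         lo = clamp(i)
--         if lo >= hi or not suffix[lo]:
--             res = seq[lo:end]
--             return res[::-1] if neg else res
--     return None
-- ===== Notes on version B (the rewrite author's own statement) =====
-- stated objective: faster
-- what changed: Instead of rebuilding the codon chunk list and a set intersection for every candidate start (A), B precomputes once, right-to-left in O(n), a table saying for each position whether some in-frame stop-codon window occurs between it and the junction, so each candidate start becomes an O(1) table lookup.
import Mathlib
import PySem

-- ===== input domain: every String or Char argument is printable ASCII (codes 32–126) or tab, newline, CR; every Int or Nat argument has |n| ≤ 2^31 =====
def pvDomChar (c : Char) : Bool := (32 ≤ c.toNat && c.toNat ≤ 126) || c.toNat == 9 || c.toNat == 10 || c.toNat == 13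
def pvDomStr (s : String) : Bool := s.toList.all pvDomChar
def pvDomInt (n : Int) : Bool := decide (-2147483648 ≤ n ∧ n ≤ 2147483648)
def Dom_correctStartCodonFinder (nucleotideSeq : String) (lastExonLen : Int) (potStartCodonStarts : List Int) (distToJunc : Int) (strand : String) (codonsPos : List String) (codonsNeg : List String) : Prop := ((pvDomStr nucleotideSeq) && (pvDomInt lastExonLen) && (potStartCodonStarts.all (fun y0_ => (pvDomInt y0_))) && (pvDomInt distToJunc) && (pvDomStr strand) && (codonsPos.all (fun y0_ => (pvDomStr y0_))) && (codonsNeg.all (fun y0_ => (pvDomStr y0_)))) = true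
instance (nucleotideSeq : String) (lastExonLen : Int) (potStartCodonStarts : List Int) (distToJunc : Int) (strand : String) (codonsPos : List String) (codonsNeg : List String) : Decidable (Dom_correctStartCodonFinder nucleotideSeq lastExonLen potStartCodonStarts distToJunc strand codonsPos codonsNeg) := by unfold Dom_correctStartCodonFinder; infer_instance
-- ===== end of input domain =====

-- B replaces A's per-candidate rebuild of the codon chunk list and set intersection by one
-- right-to-left precomputation of "is there an in-frame stop window at or after j before the
-- junction", making each candidate start an O(1) lookup (objective: faster, O(n+k) vs O(k*n)).

-- ===== PORT A =====
-- strings are carried as List Char (PySem.Chars convention); s[::-1] is List.reverse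
-- (exact by PySem.Str.slice?_none_none_neg_one)
def pvGoA (seq : List Char) (codons : List (List Char)) (lastExonLen distToJunc : Int)
    (strand : String) : List Int → Option String
  | [] => none
  | i :: rest =>
    let potSeq := PySem.List.slice seq (some i) (some distToJunc)
    let codonList := (PySem.List.pyRange 0 (potSeq.length : Int) 3).map
        (fun k => PySem.List.slice potSeq (some (0 + k)) (some (3 + k)))
    if 0 < (PySem.Set.inter (PySem.Set.ofList codonList) codons).length then
      pvGoA seq codons lastExonLen distToJunc strand rest
    else
      let finalSeq := PySem.List.slice seq (some i) (some ((seq.length : Int) - lastExonLen - 50))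
      some (String.ofList (if strand = "-" then finalSeq.reverse else finalSeq))

def correctStartCodonFinder (nucleotideSeq : String) (lastExonLen : Int) (potStartCodonStarts : List Int) (distToJunc : Int) (strand : String) (codonsPos : List String) (codonsNeg : List String) : Option String :=
  if strand = "-" then
    pvGoA nucleotideSeq.toList.reverse (codonsNeg.map (fun x => x.toList.reverse))
      lastExonLen distToJunc strand potStartCodonStarts
  else
    pvGoA nucleotideSeq.toList (codonsPos.map String.toList)
      lastExonLen distToJunc strand potStartCodonStarts

-- ===== PORT B =====
-- Python's slice-bound clamping, written out as in Source B's clamp()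
def pvClampB (n : Nat) (k : Int) : Int :=
  let k' := if k < 0 then k + n else k
  if k' < 0 then 0 else if (n : Int) < k' then n else k'

def pvGoB (seq : List Char) (suffix : List Bool) (hi endB : Int) (neg : Bool) :
    List Int → Option String
  | [] => none
  | i :: rest =>
    let lo := pvClampB seq.length i
    if hi ≤ lo || !(PySem.List.pyGetD suffix lo false) then
      let res := PySem.List.slice seq (some lo) (some endB)
      some (String.ofList (if neg then res.reverse else res))
    else
      pvGoB seq suffix hi endB neg rest

def correctStartCodonFinder_alt (nucleotideSeq : String) (lastExonLen : Int) (potStartCodonStarts : List Int) (distToJunc : Int) (strand : String) (codonsPos : List String) (codonsNeg : List String) : Option String :=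
  let neg := strand = "-"
  let seq := if neg then nucleotideSeq.toList.reverse else nucleotideSeq.toList
  let stops : PySem.Set (List Char) :=
    if neg then PySem.Set.ofList (codonsNeg.map (fun c => c.toList.reverse))
    else PySem.Set.ofList (codonsPos.map String.toList)
  let n := seq.length
  let hi := pvClampB n distToJunc
  let rev := ((PySem.List.pyRange 0 hi 1).reverse).foldl
      (fun acc j => acc ++
        [(PySem.Set.contains stops
            (PySem.List.slice seq (some j) (some (min (j + 3) hi)))
          || PySem.List.pyGetD acc (-3) false)])
      [false, false, false]
  let suffix := rev.reverse
  let endB := pvClampB n ((n : Int) - lastExonLen - 50)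
  pvGoB seq suffix hi endB neg potStartCodonStarts

-- ===== PRECONDITION & SPEC =====
def Spec_correctStartCodonFinder (nucleotideSeq : String) (lastExonLen : Int) (potStartCodonStarts : List Int) (distToJunc : Int) (strand : String) (codonsPos : List String) (codonsNeg : List String) (out : Option String) : Prop := out = correctStartCodonFinder_alt nucleotideSeq lastExonLen potStartCodonStarts distToJunc strand codonsPos codonsNeg
instance (nucleotideSeq : String) (lastExonLen : Int) (potStartCodonStarts : List Int) (distToJunc : Int) (strand : String) (codonsPos : List String) (codonsNeg : List String) (out : Option String) : Decidable (Spec_correctStartCodonFinder nucleotideSeq lastExonLen potStartCodonStarts distToJunc strand codonsPos codonsNeg out) := by unfold Spec_correctStartCodonFinder; infer_instance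

-- ===== CLAIM (what is proved, stated in full; the proofs are below) =====
def Claim_equal_correctStartCodonFinder : Prop := ∀ (nucleotideSeq : String) (lastExonLen : Int) (potStartCodonStarts : List Int) (distToJunc : Int) (strand : String) (codonsPos : List String) (codonsNeg : List String), Dom_correctStartCodonFinder nucleotideSeq lastExonLen potStartCodonStarts distToJunc strand codonsPos codonsNeg → Spec_correctStartCodonFinder nucleotideSeq lastExonLen potStartCodonStarts distToJunc strand codonsPos codonsNeg (correctStartCodonFinder nucleotideSeq lastExonLen potStartCodonStarts distToJunc strand codonsPos codonsNeg)

-- ===== LEMMAS AND PROOFS =====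

-- the (possibly truncated) codon window starting at position p, cut at the junction hi

def pvWin (s : List Char) (hi p : Nat) : List Char := (s.drop p).take (min 3 (hi - p))

def pvAns (s : List Char) (C : List (List Char)) (hi : Nat) (j : Nat) : Bool :=
  if _h : j < hi then (C.contains (pvWin s hi j) || pvAns s C hi (j + 3)) else false
termination_by hi - j

lemma pvAns_false_of_ge (s : List Char) (C : List (List Char)) (hi j : Nat) (h : hi ≤ j) :
    pvAns s C hi j = false := by
  rw [pvAns]; simp [Nat.not_lt.mpr h]

lemma pvAns_iff (s : List Char) (C : List (List Char)) (hi j : Nat) :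
    pvAns s C hi j = true ↔ ∃ p, j ≤ p ∧ p < hi ∧ 3 ∣ (p - j) ∧ pvWin s hi p ∈ C := by
  have key : ∀ m j, hi - j ≤ m →
      (pvAns s C hi j = true ↔ ∃ p, j ≤ p ∧ p < hi ∧ 3 ∣ (p - j) ∧ pvWin s hi p ∈ C) := by
    intro m
    induction m with
    | zero =>
      intro j hj
      rw [pvAns_false_of_ge s C hi j (by omega)]
      constructor
      · simp
      · rintro ⟨p, h1, h2, -, -⟩; omega
    | succ m ih =>
      intro j hj
      rw [pvAns]
      by_cases h : j < hi
      · simp only [dif_pos h, Bool.or_eq_true, List.contains_iff_mem, ih (j + 3) (by omega)]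
        constructor
        · rintro (hm | ⟨p, h1, h2, h3, h4⟩)
          · exact ⟨j, le_refl _, h, by omega, hm⟩
          · exact ⟨p, by omega, h2, by omega, h4⟩
        · rintro ⟨p, h1, h2, h3, h4⟩
          rcases Nat.eq_or_lt_of_le h1 with rfl | hlt
          · exact Or.inl h4
          · exact Or.inr ⟨p, by omega, h2, by omega, h4⟩
      · simp only [dif_neg h]
        constructor
        · simp
        · rintro ⟨p, h1, h2, -, -⟩; omega
  exact key (hi - j) j le_rfl

lemma pvSlice_clamp {α : Type} (xs : List α) (a b : Int) :
    PySem.List.slice xs (some a) (some b)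
    = PySem.List.slice xs (some ((PySem.List.clampIdx xs.length a : Nat) : Int))
        (some ((PySem.List.clampIdx xs.length b : Nat) : Int)) := by
  simp [PySem.List.slice, PySem.List.clampIdx_natCast,
    Nat.min_eq_left (PySem.List.clampIdx_le xs.length a),
    Nat.min_eq_left (PySem.List.clampIdx_le xs.length b)]

lemma pvWin_slice (s : List Char) (hiN jN : Nat) :
    PySem.List.slice s (some (jN : Int)) (some (min ((jN : Int) + 3) (hiN : Int)))
    = pvWin s hiN jN := by
  have h1 : min ((jN : Int) + 3) (hiN : Int) = ((min (jN + 3) hiN : Nat) : Int) := by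
    push_cast; omega
  have h2 : ((jN : Int) + 3) = ((jN + 3 : Nat) : Int) := by push_cast; ring
  rw [h1, PySem.List.slice_natCast]
  unfold pvWin
  congr 1
  omega

lemma pvCondA_iff (s : List Char) (C : List (List Char)) (i d : Int) :
    (0 < (PySem.Set.inter (PySem.Set.ofList
        ((PySem.List.pyRange 0 ((PySem.List.slice s (some i) (some d)).length : Int) 3).map
          (fun k => PySem.List.slice (PySem.List.slice s (some i) (some d))
            (some (0 + k)) (some (3 + k))))) C).length) ↔
    pvAns s C (PySem.List.clampIdx s.length d) (PySem.List.clampIdx s.length i) = true := by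
  set n := s.length with hn
  set loN := PySem.List.clampIdx n i with hlo
  set hiN := PySem.List.clampIdx n d with hhi
  have hlon : loN ≤ n := PySem.List.clampIdx_le n i
  have hhin : hiN ≤ n := PySem.List.clampIdx_le n d
  have hlen : (PySem.List.slice s (some i) (some d)).length = hiN - loN := by
    rw [PySem.List.length_slice]
  have hpot : PySem.List.slice s (some i) (some d) = (s.drop loN).take (hiN - loN) := by
    rfl
  have hchunk : ∀ k : Int, 0 ≤ k →
      PySem.List.slice ((s.drop loN).take (hiN - loN)) (some (0 + k)) (some (3 + k))
      = pvWin s hiN (loN + k.toNat) := by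
    intro k h0
    rw [PySem.List.slice_toNat ((s.drop loN).take (hiN - loN)) (a := 0 + k) (b := 3 + k)
      (by omega) (by omega)]
    have h3 : (3 + k).toNat - (0 + k).toNat = 3 := by omega
    have h4 : (0 + k).toNat = k.toNat := by omega
    rw [h3, h4, List.drop_take, List.take_take, List.drop_drop]
    unfold pvWin
    congr 1
    omega
  rw [List.length_pos_iff_exists_mem, pvAns_iff, hlen]
  simp only [hpot, PySem.Set.mem_inter, PySem.Set.mem_ofList, List.mem_map,
    PySem.List.mem_pyRange_iff_of_pos (by norm_num : (0:Int) < 3)]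
  constructor
  · rintro ⟨y, ⟨k, ⟨hk0, hk1, hk2⟩, rfl⟩, hC⟩
    rw [hchunk k hk0] at hC
    exact ⟨loN + k.toNat, by omega, by omega, by omega, hC⟩
  · rintro ⟨p, h1, h2, h3, h4⟩
    refine ⟨pvWin s hiN p, ⟨((p - loN : Nat) : Int), ⟨by omega, by omega, by omega⟩, ?_⟩, h4⟩
    rw [hchunk _ (by omega)]
    congr 1
    omega

lemma pvContains_ofList (C : List (List Char)) (w : List Char) :
    PySem.Set.contains (PySem.Set.ofList C) w = C.contains w := by
  rw [Bool.eq_iff_iff, PySem.Set.contains_iff, PySem.Set.mem_ofList, List.contains_iff_mem]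

lemma pvRev_inv (s : List Char) (C : List (List Char)) (hiN : Nat) :
    ∀ t, t ≤ hiN →
    List.foldl
      (fun acc (j : Int) => acc ++
        [(PySem.Set.contains (PySem.Set.ofList C)
            (PySem.List.slice s (some j) (some (min (j + 3) (hiN : Int))))
          || PySem.List.pyGetD acc (-3) false)])
      [false, false, false]
      (((List.range' (hiN - t) t).reverse).map (fun k : Nat => (k : Int)))
    = [false, false, false] ++ ((List.range' (hiN - t) t).map (pvAns s C hiN)).reverse := by
  intro t
  induction t with
  | zero => simp
  | succ t ih =>
    intro ht
    set j := hiN - (t + 1) with hjdef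
    have hj : hiN - t = j + 1 := by omega
    have hjlt : j < hiN := by omega
    have ih' := ih (by omega)
    rw [hj] at ih'
    rw [List.range'_succ, List.reverse_cons, List.map_append, List.foldl_append, ih']
    simp only [List.map_cons, List.map_nil, List.foldl_cons, List.foldl_nil]
    have hget : PySem.List.pyGetD
        ([false, false, false] ++ ((List.range' (j + 1) t).map (pvAns s C hiN)).reverse)
        (-3) false = pvAns s C hiN (j + 3) := by
      simp only [PySem.List.pyGetD]
      rw [PySem.List.pyGet?_neg_ofNat _ 3 (by norm_num) (by simp only [List.length_append, List.length_cons, List.length_nil, List.length_reverse, List.length_map, List.length_range']; omega)]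
      have hlen : ([false, false, false] ++
          ((List.range' (j + 1) t).map (pvAns s C hiN)).reverse).length = 3 + t := by
        simp; omega
      rw [hlen]
      by_cases h3 : 3 ≤ t
      · rw [show 3 + t - 3 = t by omega,
          List.getElem?_append_right (by simp only [List.length_append, List.length_cons, List.length_nil, List.length_reverse, List.length_map, List.length_range']; omega),
          List.getElem?_reverse (by simp; omega)]
        simp only [List.length_cons, List.length_nil, List.length_map, List.length_range']
        rw [show t - 3 = t - 3 by rfl]
        rw [show t - 1 - (t - 3) = 2 by omega, List.getElem?_map,
          List.getElem?_range' (by omega)]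
        simp
      · rw [show 3 + t - 3 = t by omega, List.getElem?_append_left (by simp; omega)]
        rw [pvAns_false_of_ge s C hiN (j + 3) (by omega)]
        interval_cases t <;> simp
    rw [hget, pvWin_slice s hiN j, pvContains_ofList]
    have hstep : (C.contains (pvWin s hiN j) || pvAns s C hiN (j + 3)) = pvAns s C hiN j := by
      conv_rhs => rw [pvAns]
      rw [dif_pos hjlt]
    rw [hstep]
    simp [List.reverse_cons, List.append_assoc]

lemma pvRev_spec (s : List Char) (C : List (List Char)) (hiN : Nat) :
    ((PySem.List.pyRange 0 (hiN : Int) 1).reverse).foldl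
      (fun acc j => acc ++
        [(PySem.Set.contains (PySem.Set.ofList C)
            (PySem.List.slice s (some j) (some (min (j + 3) (hiN : Int))))
          || PySem.List.pyGetD acc (-3) false)])
      [false, false, false]
    = [false, false, false] ++ ((List.range hiN).map (pvAns s C hiN)).reverse := by
  have h := pvRev_inv s C hiN hiN le_rfl
  rw [Nat.sub_self] at h
  rw [PySem.List.pyRange_zero_natCast, ← List.map_reverse, List.range_eq_range']
  exact h

lemma pvClampB_eq (n : Nat) (k : Int) :
    pvClampB n k = ((PySem.List.clampIdx n k : Nat) : Int) := by
  simp only [pvClampB, PySem.List.clampIdx]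
  split_ifs <;> simp_all <;> omega

lemma pvSuffix_get (s : List Char) (C : List (List Char)) (hiN loN : Nat) (hlt : loN < hiN) :
    PySem.List.pyGetD (((List.range hiN).map (pvAns s C hiN)) ++ [false, false, false])
      ((loN : Nat) : Int) false = pvAns s C hiN loN := by
  rw [PySem.List.pyGetD_natCast, List.getD_eq_getElem?_getD,
    List.getElem?_append_left (by simp; omega), List.getElem?_map, List.getElem?_range hlt]
  rfl

lemma pvLoop_eq (s : List Char) (C : List (List Char)) (lel d : Int) (strand : String)
    (lst : List Int) :
    pvGoA s C lel d strand lst =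
    pvGoB s (((List.range (PySem.List.clampIdx s.length d)).map
        (pvAns s C (PySem.List.clampIdx s.length d))) ++ [false, false, false])
      ((PySem.List.clampIdx s.length d : Nat) : Int)
      ((PySem.List.clampIdx s.length ((s.length : Int) - lel - 50) : Nat) : Int)
      (strand = "-") lst := by
  induction lst with
  | nil => rfl
  | cons i rest ih =>
    simp only [pvGoA, pvGoB, pvClampB_eq]
    by_cases hA : pvAns s C (PySem.List.clampIdx s.length d) (PySem.List.clampIdx s.length i)
        = true
    · have hlt : PySem.List.clampIdx s.length i < PySem.List.clampIdx s.length d := by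
        by_contra hge
        rw [pvAns_false_of_ge _ _ _ _ (by omega)] at hA; simp at hA
      rw [if_pos ((pvCondA_iff s C i d).mpr hA)]
      rw [pvSuffix_get s C _ _ hlt, hA]
      have : ¬ ((PySem.List.clampIdx s.length d : Nat) : Int)
          ≤ ((PySem.List.clampIdx s.length i : Nat) : Int) := by exact_mod_cast Nat.not_le.mpr hlt
      simp only [this, decide_false, Bool.not_true, Bool.or_false, if_false]
      exact ih
    · rw [if_neg (fun hc => hA ((pvCondA_iff s C i d).mp hc))]
      have hguard : ((decide (((PySem.List.clampIdx s.length d : Nat) : Int)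
          ≤ ((PySem.List.clampIdx s.length i : Nat) : Int)))
          || !(PySem.List.pyGetD (((List.range (PySem.List.clampIdx s.length d)).map
              (pvAns s C (PySem.List.clampIdx s.length d))) ++ [false, false, false])
            ((PySem.List.clampIdx s.length i : Nat) : Int) false)) = true := by
        by_cases hlt : PySem.List.clampIdx s.length i < PySem.List.clampIdx s.length d
        · rw [pvSuffix_get s C _ _ hlt]
          simp [Bool.eq_false_iff.mpr hA]
        · have : ((PySem.List.clampIdx s.length d : Nat) : Int)
              ≤ ((PySem.List.clampIdx s.length i : Nat) : Int) := by
            exact_mod_cast Nat.le_of_not_lt hlt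
          simp [this]
      rw [hguard]
      simp only [if_true]
      rw [pvSlice_clamp s i ((s.length : Int) - lel - 50)]
      by_cases hs : strand = "-" <;> simp [hs]

-- ===== VERDICT (by name: the statement is the Claim_ definition above) =====
theorem correctStartCodonFinder_spec : Claim_equal_correctStartCodonFinder := by
  intro nucleotideSeq lastExonLen potStartCodonStarts distToJunc strand codonsPos codonsNeg _
  unfold Spec_correctStartCodonFinder correctStartCodonFinder correctStartCodonFinder_alt
  by_cases h : strand = "-"
  · simp only [h, if_true, decide_true, pvClampB_eq]
    rw [pvRev_spec]
    simp only [List.reverse_append, List.reverse_reverse, List.reverse_cons, List.reverse_nil,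
      List.nil_append, List.append_assoc]
    simpa [h] using
      pvLoop_eq nucleotideSeq.toList.reverse (codonsNeg.map (fun x => x.toList.reverse))
        lastExonLen distToJunc strand potStartCodonStarts
  · simp only [h, if_false, decide_false, ite_false, Bool.false_eq_true, pvClampB_eq]
    rw [pvRev_spec]
    simp only [List.reverse_append, List.reverse_reverse, List.reverse_cons, List.reverse_nil,
      List.nil_append, List.append_assoc]
    simpa [h] using
      pvLoop_eq nucleotideSeq.toList (codonsPos.map String.toList)
        lastExonLen distToJunc strand potStartCodonStarts
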